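-- pv_equiv track=rewrite | github.com/harrisonized/interview-practice | functions/iterators.py | idx_for_diag_nw_from_bl
-- ===== SOURCE A (Python) =====
-- def idx_for_diag_nw_from_bl(num_rows=2, num_cols=3):
--     """Traverse northwest diagonals from bottom left
--     Eg.
--
--       0    1    2
--        \\   \\   \\
--     -1 ['A', 'B', 'C']
--        \\   \\   \\
--        ['D', 'E', 'F']
--
--     Returns row and col indices for: D, E, A, F, B, C
--     """
--
--     # lower left triangle
--     for col in range(num_cols-1):
--         row = num_rows-1
--         while row >= 0 and col >= 0:
--             yield row, col
--             row -= 1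
--             col -= 1
--
--     # upper right triangle
--     for row in range(num_rows-1, -1, -1):
--         col = num_cols-1
--         while row >= 0 and col >= 0:
--             yield row, col
--             row -= 1
--             col -= 1
-- ===== SOURCE B (Python) =====
-- def idx_for_diag_nw_from_bl(num_rows=2, num_cols=3):
--     """Same traversal, one loop over the diagonal index d = row - col,
--     from the bottom-left diagonal (largest d) to the top-right (smallest)."""
--     for d in range(num_rows - 1, -num_cols, -1):
--         row = min(num_rows - 1, num_cols - 1 + d)
--         col = row - d
--         while row >= 0 and col >= 0:
--             yield row, col
--             row -= 1
--             col -= 1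
-- ===== Notes on version B (the rewrite author's own statement) =====
-- stated objective: simpler
-- what changed: Replaces A's two-triangle decomposition (lower-left columns then upper-right rows) by a single loop over the diagonal index d = row - col, computing each diagonal's bottom-most start cell arithmetically.
import Mathlib
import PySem

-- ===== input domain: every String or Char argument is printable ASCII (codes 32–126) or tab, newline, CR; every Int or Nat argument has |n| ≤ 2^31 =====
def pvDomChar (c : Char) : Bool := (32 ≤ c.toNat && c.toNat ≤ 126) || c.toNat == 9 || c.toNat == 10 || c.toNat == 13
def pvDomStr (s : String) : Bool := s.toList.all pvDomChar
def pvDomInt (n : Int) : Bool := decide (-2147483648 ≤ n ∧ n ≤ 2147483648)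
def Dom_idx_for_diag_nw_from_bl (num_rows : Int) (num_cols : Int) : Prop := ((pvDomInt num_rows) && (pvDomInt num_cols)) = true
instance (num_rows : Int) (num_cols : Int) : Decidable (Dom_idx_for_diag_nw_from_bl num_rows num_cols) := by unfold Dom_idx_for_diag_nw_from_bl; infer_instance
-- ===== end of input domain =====

-- B replaces A's two triangle loops by one loop over the diagonal index d = row - col; same cost, simpler shape.
-- (A is a generator; both ports return the list of all yielded pairs.)

-- ===== PORT A =====
-- the inner 'while row >= 0 and col >= 0: yield row, col; row -= 1; col -= 1' loop (identical in both Pythons)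
def walkUp (row col : Int) : List (Int × Int) :=
  if 0 ≤ row ∧ 0 ≤ col then (row, col) :: walkUp (row - 1) (col - 1) else []
termination_by (row + 1).toNat
decreasing_by omega

def idx_for_diag_nw_from_bl (num_rows : Int) (num_cols : Int) : List (Int × Int) :=
  -- lower left triangle: for col in range(num_cols-1), start at row = num_rows-1
  ((PySem.List.pyRange 0 (num_cols - 1) 1).flatMap (fun col => walkUp (num_rows - 1) col))
  -- upper right triangle: for row in range(num_rows-1, -1, -1), start at col = num_cols-1
  ++ ((PySem.List.pyRange (num_rows - 1) (-1) (-1)).flatMap (fun row => walkUp row (num_cols - 1)))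

-- ===== PORT B =====
def idx_for_diag_nw_from_bl_alt (num_rows : Int) (num_cols : Int) : List (Int × Int) :=
  (PySem.List.pyRange (num_rows - 1) (-num_cols) (-1)).flatMap (fun d =>
    let row := min (num_rows - 1) (num_cols - 1 + d)
    walkUp row (row - d))

-- ===== PRECONDITION & SPEC =====
def Spec_idx_for_diag_nw_from_bl (num_rows : Int) (num_cols : Int) (out : List (Int × Int)) : Prop := out = idx_for_diag_nw_from_bl_alt num_rows num_cols
instance (num_rows : Int) (num_cols : Int) (out : List (Int × Int)) : Decidable (Spec_idx_for_diag_nw_from_bl num_rows num_cols out) := by unfold Spec_idx_for_diag_nw_from_bl; infer_instance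

-- ===== CLAIM (what is proved, stated in full; the proofs are below) =====
def Claim_equal_idx_for_diag_nw_from_bl : Prop := ∀ (num_rows : Int) (num_cols : Int), Dom_idx_for_diag_nw_from_bl num_rows num_cols → Spec_idx_for_diag_nw_from_bl num_rows num_cols (idx_for_diag_nw_from_bl num_rows num_cols)

-- ===== LEMMAS AND PROOFS =====

theorem walkUp_nil (row col : Int) (h : row < 0 ∨ col < 0) : walkUp row col = [] := by
  rw [walkUp]; rw [if_neg]; omega

theorem flatMap_nil {α β : Type} (l : List α) (f : α → List β)
    (h : ∀ a ∈ l, f a = []) : l.flatMap f = [] := by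
  induction l with
  | nil => rfl
  | cons x xs ih => simp [List.flatMap_cons, h x (by simp), ih (fun a ha => h a (by simp [ha]))]

-- split a countdown range at any intermediate point
theorem pyRange_neg_one_append (a m b : Int) (h1 : b ≤ m) (h2 : m ≤ a) :
    PySem.List.pyRange a b (-1) = PySem.List.pyRange a m (-1) ++ PySem.List.pyRange m b (-1) := by
  rw [PySem.List.pyRange_neg_one_eq_reverse, PySem.List.pyRange_neg_one_eq_reverse,
      PySem.List.pyRange_neg_one_eq_reverse,
      PySem.List.pyRange_one_append (b + 1) (m + 1) (a + 1) (by omega) (by omega),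
      List.reverse_append]

theorem main_eq (nr nc : Int) :
    idx_for_diag_nw_from_bl nr nc = idx_for_diag_nw_from_bl_alt nr nc := by
  unfold idx_for_diag_nw_from_bl idx_for_diag_nw_from_bl_alt
  by_cases hnr : nr ≤ 0
  · -- no rows: every walk is empty on both sides
    have hB : (PySem.List.pyRange (nr - 1) (-nc) (-1)).flatMap (fun d =>
        let row := min (nr - 1) (nc - 1 + d); walkUp row (row - d)) = [] := by
      apply flatMap_nil
      intro d _
      show walkUp (min (nr - 1) (nc - 1 + d)) (min (nr - 1) (nc - 1 + d) - d) = []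
      exact walkUp_nil _ _ (by omega)
    rw [hB, flatMap_nil _ _ (fun col _ => walkUp_nil _ _ (by omega)),
        PySem.List.pyRange_neg_one_eq_nil (by omega : nr - 1 ≤ -1)]
    rfl
  by_cases hnc : nc ≤ 0
  · -- no cols
    have hB : (PySem.List.pyRange (nr - 1) (-nc) (-1)).flatMap (fun d =>
        let row := min (nr - 1) (nc - 1 + d); walkUp row (row - d)) = [] := by
      apply flatMap_nil
      intro d _
      show walkUp (min (nr - 1) (nc - 1 + d)) (min (nr - 1) (nc - 1 + d) - d) = []
      exact walkUp_nil _ _ (by omega)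
    rw [hB, PySem.List.pyRange_one_eq_nil (by omega : nc - 1 ≤ 0),
        flatMap_nil _ _ (fun row _ => walkUp_nil row (nc - 1) (Or.inr (by omega)))]
    rfl
  -- main case: 1 ≤ nr, 1 ≤ nc; split B's d-range at d = nr - nc
  rw [pyRange_neg_one_append (nr - 1) (nr - nc) (-nc) (by omega) (by omega),
      List.flatMap_append]
  congr 1
  · -- first B chunk = A's lower-left triangle
    rw [PySem.List.pyRange_neg_one, PySem.List.pyRange_one, List.flatMap_map, List.flatMap_map]
    have hlen : (nr - 1 - (nr - nc)).toNat = (nc - 1 - 0).toNat := by omega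
    rw [hlen]
    apply List.flatMap_congr
    intro k hk
    have hk' : (k : Int) ≤ nc - 2 := by
      have := List.mem_range.mp hk; omega
    have hmin : min (nr - 1) (nc - 1 + (nr - 1 - (k : Int))) = nr - 1 := by omega
    rw [hmin]
    congr 1 <;> omega
  · -- second B chunk = A's upper-right triangle
    rw [PySem.List.pyRange_neg_one, PySem.List.pyRange_neg_one, List.flatMap_map, List.flatMap_map]
    have hlen : (nr - nc - -nc).toNat = (nr - 1 - -1).toNat := by omega
    rw [hlen]
    apply List.flatMap_congr
    intro k _
    have hmin : min (nr - 1) (nc - 1 + (nr - nc - (k : Int))) = nr - 1 - (k : Int) := by omega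
    rw [hmin]
    congr 1
    omega

-- ===== VERDICT (by name: the statement is the Claim_ definition above) =====
theorem idx_for_diag_nw_from_bl_spec : Claim_equal_idx_for_diag_nw_from_bl := by
  intro nr nc _
  exact main_eq nr nc
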